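-- pv_equiv track=rewrite | github.com/zekel32/Key-Exchange | scripts/gpg_utils.py | check_course_signature
-- ===== SOURCE A (Python) =====
-- COURSE_FINGERPRINT = "4DD5B3791798E493F6499F8DA049C765A07C89D8"
--
-- COURSE_LONG_ID = COURSE_FINGERPRINT[-16:]  # A049C765A07C89D8
--
-- def check_course_signature(gpg_output: str) -> bool:
--     """
--     Check if gpg --check-sigs output contains a valid course signature.
--
--     Correctly handles multiple keys in the keyring by tracking which
--     key block we're currently examining.
--     """
--     current_key_is_student = False
--
--     for line in gpg_output.split("\n"):
--         parts = line.split(":")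
--         if len(parts) < 2:
--             continue
--
--         record_type = parts[0]
--
--         # "pub" starts a new key block
--         if record_type == "pub" and len(parts) > 4:
--             key_id = parts[4]
--             current_key_is_student = (key_id != COURSE_LONG_ID)
--
--         # Only check signatures on the student key
--         if record_type == "sig" and current_key_is_student and len(parts) > 12:
--             validity = parts[1]
--             signer_key_id = parts[4]
--             signer_fingerprint = parts[12]
--
--             if signer_fingerprint == COURSE_FINGERPRINT or signer_key_id == COURSE_LONG_ID:
--                 return validity == "!"
--
--     return False
-- ===== SOURCE B (Python) =====
-- COURSE_FINGERPRINT = "4DD5B3791798E493F6499F8DA049C765A07C89D8"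
--
-- COURSE_LONG_ID = COURSE_FINGERPRINT[-16:]
--
--
-- def _first_match(sigs):
--     """Validity of the first sig in the block signed by the course key, else None."""
--     for validity, signer_key_id, signer_fingerprint in sigs:
--         if signer_fingerprint == COURSE_FINGERPRINT or signer_key_id == COURSE_LONG_ID:
--             return validity
--     return None
--
--
-- def _group_blocks(records):
--     """Group colon-records into key blocks: (is_student, [(validity, key_id, fpr), ...])."""
--     blocks = []
--     i = 0
--     n = len(records)
--     while i < n:
--         p = records[i]
--         if p[0] == "pub" and len(p) > 4:
--             is_student = p[4] != COURSE_LONG_ID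
--             sigs = []
--             i += 1
--             while i < n and not (records[i][0] == "pub" and len(records[i]) > 4):
--                 q = records[i]
--                 if q[0] == "sig" and len(q) > 12:
--                     sigs.append((q[1], q[4], q[12]))
--                 i += 1
--             blocks.append((is_student, sigs))
--         else:
--             i += 1
--     return blocks
--
--
-- def check_course_signature(gpg_output: str) -> bool:
--     records = []
--     for line in gpg_output.split("\n"):
--         parts = line.split(":")
--         if len(parts) >= 2:
--             records.append(parts)
--     for is_student, sigs in _group_blocks(records):
--         if is_student:
--             v = _first_match(sigs)
--             if v is not None:
--                 return v == "!"
--     return False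
-- ===== Notes on version B (the rewrite author's own statement) =====
-- stated objective: alternative
-- what changed: Replaces A's single flat pass carrying a mutable student-key flag by a two-phase decomposition: first group the colon-records into per-key blocks of collected sigs, then scan the blocks for the first course-signed sig on a student key.
import Mathlib
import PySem

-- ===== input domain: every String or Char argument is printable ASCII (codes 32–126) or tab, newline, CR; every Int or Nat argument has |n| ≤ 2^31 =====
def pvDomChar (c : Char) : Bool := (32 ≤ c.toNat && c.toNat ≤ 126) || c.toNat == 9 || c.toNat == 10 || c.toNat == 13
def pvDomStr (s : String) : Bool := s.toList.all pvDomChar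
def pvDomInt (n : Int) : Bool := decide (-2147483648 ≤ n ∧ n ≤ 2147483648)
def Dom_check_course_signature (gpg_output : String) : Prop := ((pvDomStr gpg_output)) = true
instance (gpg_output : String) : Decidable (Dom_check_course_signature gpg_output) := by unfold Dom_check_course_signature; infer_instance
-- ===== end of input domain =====

-- B regroups A's flat flag-carrying pass into per-key blocks first, then scans the blocks (objective: alternative decomposition).

def pvCFP : String := "4DD5B3791798E493F6499F8DA049C765A07C89D8"

-- COURSE_LONG_ID = COURSE_FINGERPRINT[-16:]
def pvCID : String := PySem.Str.slice pvCFP (some (-16)) none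

-- s.split(sep); sep is always a nonempty literal here, so split? is some (exact)
def pvSplit (s sep : String) : List String := (PySem.Str.split? s sep).getD []

-- parts[i] for an index guarded by a length check in the Python (exact there)
def pvGet (l : List String) (i : Nat) : String := PySem.List.pyGetD l (i : Int) ""

-- ===== PORT A =====
-- A's for-loop with early return, as recursion over the lines with the flag as state
def csLoopA : List String → Bool → Bool
  | [], _ => false
  | line :: rest, flag =>
    let parts := pvSplit line ":"
    if parts.length < 2 then csLoopA rest flag
    else
      let rt := pvGet parts 0
      let flag' := if rt = "pub" ∧ 4 < parts.length then decide (pvGet parts 4 ≠ pvCID) else flag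
      if rt = "sig" ∧ flag' = true ∧ 12 < parts.length then
        if pvGet parts 12 = pvCFP ∨ pvGet parts 4 = pvCID then decide (pvGet parts 1 = "!")
        else csLoopA rest flag'
      else csLoopA rest flag'

def check_course_signature (gpg_output : String) : Bool :=
  csLoopA (pvSplit gpg_output "\n") false

-- ===== PORT B =====
-- the record pre-filter loop of Source B
def recordsOf : List String → List (List String)
  | [] => []
  | line :: rest =>
    let parts := pvSplit line ":"
    if 2 ≤ parts.length then parts :: recordsOf rest else recordsOf rest

-- Source B's inner while loop: collect the sig records up to the next pub record, return them with the rest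
def collectSigs : List (List String) → (List (String × String × String)) × List (List String)
  | [] => ([], [])
  | p :: rest =>
    if pvGet p 0 = "pub" ∧ 4 < p.length then ([], p :: rest)
    else
      let sr := collectSigs rest
      if pvGet p 0 = "sig" ∧ 12 < p.length then
        ((pvGet p 1, pvGet p 4, pvGet p 12) :: sr.1, sr.2)
      else sr

-- needed by groupBlocks's termination proof
theorem collectSigs_snd_le (l : List (List String)) : (collectSigs l).2.length ≤ l.length := by
  induction l with
  | nil => simp [collectSigs]
  | cons p rest ih =>
    simp only [collectSigs]
    split
    · simp
    · split <;> simp <;> omega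

-- Source B's outer while loop of _group_blocks
def groupBlocks : List (List String) → List (Bool × List (String × String × String))
  | [] => []
  | p :: rest =>
    if pvGet p 0 = "pub" ∧ 4 < p.length then
      let sr := collectSigs rest
      (decide (pvGet p 4 ≠ pvCID), sr.1) :: groupBlocks sr.2
    else groupBlocks rest
  termination_by l => l.length
  decreasing_by
    · exact Nat.lt_succ_of_le (by simpa using collectSigs_snd_le rest)
    · simp

-- Source B's _first_match loop
def firstMatch : List (String × String × String) → Option String
  | [] => none
  | (v, kid, fpr) :: rest =>
    if fpr = pvCFP ∨ kid = pvCID then some v else firstMatch rest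

-- Source B's final loop over the blocks
def scanBlocks : List (Bool × List (String × String × String)) → Bool
  | [] => false
  | (b, sigs) :: rest =>
    if b then
      match firstMatch sigs with
      | some v => decide (v = "!")
      | none => scanBlocks rest
    else scanBlocks rest

def check_course_signature_alt (gpg_output : String) : Bool :=
  scanBlocks (groupBlocks (recordsOf (pvSplit gpg_output "\n")))

-- ===== PRECONDITION & SPEC =====
def Spec_check_course_signature (gpg_output : String) (out : Bool) : Prop := out = check_course_signature_alt gpg_output
instance (gpg_output : String) (out : Bool) : Decidable (Spec_check_course_signature gpg_output out) := by unfold Spec_check_course_signature; infer_instance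

-- ===== CLAIM (what is proved, stated in full; the proofs are below) =====
def Claim_equal_check_course_signature : Prop := ∀ (gpg_output : String), Dom_check_course_signature gpg_output → Spec_check_course_signature gpg_output (check_course_signature gpg_output)

-- ===== LEMMAS AND PROOFS =====
-- A's loop over the pre-filtered records only (short lines dropped)
def csLoopR : List (List String) → Bool → Bool
  | [], _ => false
  | parts :: rest, flag =>
    let rt := pvGet parts 0
    let flag' := if rt = "pub" ∧ 4 < parts.length then decide (pvGet parts 4 ≠ pvCID) else flag
    if rt = "sig" ∧ flag' = true ∧ 12 < parts.length then
      if pvGet parts 12 = pvCFP ∨ pvGet parts 4 = pvCID then decide (pvGet parts 1 = "!")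
      else csLoopR rest flag'
    else csLoopR rest flag'

theorem csLoopA_eq_csLoopR (lines : List String) (flag : Bool) :
    csLoopA lines flag = csLoopR (recordsOf lines) flag := by
  induction lines generalizing flag with
  | nil => rfl
  | cons line rest ih =>
    simp only [csLoopA, recordsOf]
    by_cases h : (pvSplit line ":").length < 2
    · have h2 : ¬ 2 ≤ (pvSplit line ":").length := by omega
      rw [if_pos h, if_neg h2, ih]
    · have h2 : 2 ≤ (pvSplit line ":").length := by omega
      rw [if_neg h, if_pos h2]
      simp only [csLoopR, ih]

-- the reference shape: what A computes from a record list, phrased through B's block structure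
def rhsShape (recs : List (List String)) (flag : Bool) : Bool :=
  if flag then
    match firstMatch (collectSigs recs).1 with
    | some v => decide (v = "!")
    | none => scanBlocks (groupBlocks (collectSigs recs).2)
  else scanBlocks (groupBlocks (collectSigs recs).2)

theorem csLoopR_eq (recs : List (List String)) : ∀ flag : Bool,
    csLoopR recs flag = rhsShape recs flag := by
  induction recs with
  | nil =>
    intro flag
    cases flag <;> simp [csLoopR, rhsShape, collectSigs, groupBlocks, scanBlocks, firstMatch]
  | cons p rest ih =>
    intro flag
    by_cases hpub : pvGet p 0 = "pub" ∧ 4 < p.length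
    · have hsig : ¬ pvGet p 0 = "sig" := by rw [hpub.1]; decide
      simp only [csLoopR, if_pos hpub, ih]
      simp only [rhsShape, collectSigs, if_pos hpub, groupBlocks]
      cases hb : decide (pvGet p 4 ≠ pvCID) <;>
        cases flag <;>
          simp [scanBlocks, firstMatch, hsig]
    · by_cases hsig : pvGet p 0 = "sig" ∧ 12 < p.length
      · by_cases hm : pvGet p 12 = pvCFP ∨ pvGet p 4 = pvCID
        · cases flag
          · simp only [csLoopR, if_neg hpub, ih]
            simp [rhsShape, collectSigs, if_neg hpub, if_pos hsig]
          · simp only [csLoopR, if_neg hpub, if_pos hm]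
            simp [rhsShape, collectSigs, if_neg hpub, if_pos hsig, firstMatch, hm]
        · cases flag
          · simp only [csLoopR, if_neg hpub, ih]
            simp [rhsShape, collectSigs, if_neg hpub, if_pos hsig]
          · simp only [csLoopR, if_neg hpub, if_neg hm, ih]
            simp [rhsShape, collectSigs, if_neg hpub, if_pos hsig, firstMatch, hm]
      · simp only [csLoopR, if_neg hpub, ih]
        simp [rhsShape, collectSigs, if_neg hpub, if_neg hsig]
        intro h1 _ h3 _
        exact absurd ⟨h1, h3⟩ hsig

-- skipping the prefix before the first pub does not change the blocks
theorem groupBlocks_collectSigs (recs : List (List String)) :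
    groupBlocks (collectSigs recs).2 = groupBlocks recs := by
  induction recs with
  | nil => rfl
  | cons p rest ih =>
    by_cases hpub : pvGet p 0 = "pub" ∧ 4 < p.length
    · simp [collectSigs, hpub]
    · simp only [collectSigs, if_neg hpub]
      split <;> simpa [groupBlocks, if_neg hpub] using ih

-- ===== VERDICT (by name: the statement is the Claim_ definition above) =====
theorem check_course_signature_spec : Claim_equal_check_course_signature := by
  intro g _
  unfold Spec_check_course_signature check_course_signature check_course_signature_alt
  rw [csLoopA_eq_csLoopR, csLoopR_eq]
  simp [rhsShape, groupBlocks_collectSigs]
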